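-- pv_equiv track=rewrite | github.com/rohith2113/Learning-SQL | All about SQL and it's categories/truminds.py | ABPairs
-- ===== SOURCE A (Python) =====
-- def ABPairs(N):
--     b = 1
--     m = 0
--
--     while N + m != 2 * (N ^ m):
--         mask = 2 * b - 1
--         if ((N + m) & mask) != ((2 * (N ^ m)) & mask):
--             m += b
--         b *= 2
--     pass
--     return m
-- ===== SOURCE B (Python) =====
-- def ABPairs(N):
--     i = 0
--     m = 0
--     carry = 0
--     while (N >> i) != 0 or carry != 0:
--         ni = (N >> i) & 1
--         mi = ni ^ carry
--         m += mi << i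
--         carry = ni & mi
--         i += 1
--     return m
-- ===== Notes on version B (the rewrite author's own statement) =====
-- stated objective: alternative
-- what changed: A decides each bit by re-evaluating the whole-number equation (N plus m equals twice N-xor-m) and its masked low-bit version on every iteration; B instead derives the bit recurrence m_i = n_i XOR carry with carry' = n_i AND m_i and builds m in a single pass over the bits, maintaining only the running carry.
import Mathlib
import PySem

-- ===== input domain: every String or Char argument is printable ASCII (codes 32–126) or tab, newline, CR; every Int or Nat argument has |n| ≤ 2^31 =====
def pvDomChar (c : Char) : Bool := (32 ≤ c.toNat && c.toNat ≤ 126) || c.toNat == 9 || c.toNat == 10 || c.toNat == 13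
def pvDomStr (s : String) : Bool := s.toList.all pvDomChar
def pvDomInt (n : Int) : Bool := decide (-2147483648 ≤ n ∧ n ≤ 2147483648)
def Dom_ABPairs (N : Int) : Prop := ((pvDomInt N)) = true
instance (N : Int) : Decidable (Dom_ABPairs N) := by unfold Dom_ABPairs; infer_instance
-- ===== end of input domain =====

-- B replaces A's repeated whole-number re-evaluations of the equation N+m = 2*(N^m) by a single
-- bit recurrence (m_i = n_i XOR carry), a different decomposition of the same search; return
-- values agree on all N ≥ 0 (both A and B loop forever on negative N, which Pre_ excludes).

-- ===== PORT A =====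
-- fuel-bounded transliteration of A's while-loop (state b, m); fuel 100 covers every |N| ≤ 2^31
def ABPairsLoopA (N : Int) : Nat → Int → Int → Int
  | 0, _, m => m
  | f+1, b, m =>
    if N + m = 2 * PySem.Int.bxor N m then m
    else
      let mask := 2 * b - 1
      let m' := if PySem.Int.band (N + m) mask ≠ PySem.Int.band (2 * PySem.Int.bxor N m) mask
                then m + b else m
      ABPairsLoopA N f (b * 2) m'

def ABPairs (N : Int) : Int := ABPairsLoopA N 100 1 0

-- ===== PORT B =====
-- fuel-bounded transliteration of B's while-loop (state i, m, carry); i is the shift count (≥ 0)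
def ABPairsLoopB (N : Int) : Nat → Nat → Int → Int → Int
  | 0, _, m, _ => m
  | f+1, i, m, carry =>
    if N >>> i ≠ 0 ∨ carry ≠ 0 then
      let ni := PySem.Int.band (N >>> i) 1
      let mi := PySem.Int.bxor ni carry
      ABPairsLoopB N f (i+1) (m + (mi <<< i)) (PySem.Int.band ni mi)
    else m

def ABPairs_alt (N : Int) : Int := ABPairsLoopB N 100 0 0 0

-- ===== PRECONDITION & SPEC =====
-- Pre_ excludes negative N: there A's while-loop never terminates (no return value to match).
def Pre_ABPairs (N : Int) : Prop := 0 ≤ N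
instance (N : Int) : Decidable (Pre_ABPairs N) := by unfold Pre_ABPairs; infer_instance
def pvWitness_ABPairs : Int := (5)

def Spec_ABPairs (N : Int) (out : Int) : Prop := out = ABPairs_alt N
instance (N : Int) (out : Int) : Decidable (Spec_ABPairs N out) := by unfold Spec_ABPairs; infer_instance

-- ===== CLAIM (what is proved, stated in full; the proofs are below) =====
def Claim_equal_ABPairs : Prop := ∀ (N : Int), Dom_ABPairs N → Pre_ABPairs N → Spec_ABPairs N (ABPairs N)

-- ===== LEMMAS AND PROOFS =====

theorem xor_bit_arith (a b : Nat) (r1 r2 : Nat) (h1 : r1 < 2) (h2 : r2 < 2) :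
    (2*a + r1) ^^^ (2*b + r2) = 2*(a ^^^ b) + (r1 ^^^ r2) := by
  have d1 : r1 = 0 ∨ r1 = 1 := by omega
  have d2 : r2 = 0 ∨ r2 = 1 := by omega
  have e1 : 2*a + r1 = Nat.bit (r1 = 1) a := by
    rcases d1 with h | h <;> simp [h, Nat.bit_val]
  have e2 : 2*b + r2 = Nat.bit (r2 = 1) b := by
    rcases d2 with h | h <;> simp [h, Nat.bit_val]
  rw [e1, e2, Nat.xor_bit, Nat.bit_val]
  rcases d1 with h | h <;> rcases d2 with g | g <;> simp [h, g]

theorem split_xor : ∀ (k : Nat) (a b lo1 lo2 : Nat), lo1 < 2^k → lo2 < 2^k →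
    (2^k*a + lo1) ^^^ (2^k*b + lo2) = 2^k*(a ^^^ b) + (lo1 ^^^ lo2)
  | 0, a, b, lo1, lo2, h1, h2 => by
      interval_cases lo1 <;> interval_cases lo2 <;> simp
  | (k+1), a, b, lo1, lo2, h1, h2 => by
      have hp : (0:Nat) < 2^k := Nat.two_pow_pos k
      have hk1 : (2:Nat)^(k+1) = 2^k*2 := Nat.pow_succ ..
      have p1 : (2:Nat)^(k+1)*a = 2*(2^k*a) := by rw [Nat.pow_succ]; ring
      have p2 : (2:Nat)^(k+1)*b = 2*(2^k*b) := by rw [Nat.pow_succ]; ring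
      have p3 : (2:Nat)^(k+1)*(a ^^^ b) = 2*(2^k*(a ^^^ b)) := by rw [Nat.pow_succ]; ring
      have e1 : 2^(k+1)*a + lo1 = 2*(2^k*a + lo1/2) + lo1 % 2 := by omega
      have e2 : 2^(k+1)*b + lo2 = 2*(2^k*b + lo2/2) + lo2 % 2 := by omega
      have hl1 : lo1/2 < 2^k := by omega
      have hl2 : lo2/2 < 2^k := by omega
      have e3 := xor_bit_arith (lo1/2) (lo2/2) (lo1 % 2) (lo2 % 2) (Nat.mod_lt _ (by omega)) (Nat.mod_lt _ (by omega))
      have e4 : lo1 = 2*(lo1/2) + lo1 % 2 := by omega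
      have e5 : lo2 = 2*(lo2/2) + lo2 % 2 := by omega
      rw [e1, e2, xor_bit_arith _ _ _ _ (Nat.mod_lt _ (by omega)) (Nat.mod_lt _ (by omega)),
        split_xor k a b _ _ hl1 hl2]
      conv_rhs => rw [e4, e5, e3]
      omega

-- n ^^^ m splits into the bits above k (those of n) and the low k bits, when m < 2^k
theorem xor_split_at (n m k : Nat) (hm : m < 2^k) :
    n ^^^ m = 2^k * (n >>> k) + ((n % 2^k) ^^^ m) := by
  have hp : (0:Nat) < 2^k := Nat.two_pow_pos k
  have hd : n = 2^k * (n / 2^k) + n % 2^k := (Nat.div_add_mod n (2^k)).symm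
  have := split_xor k (n / 2^k) 0 (n % 2^k) m (Nat.mod_lt _ hp) hm
  rw [Nat.shiftRight_eq_div_pow]
  calc n ^^^ m = (2^k * (n / 2^k) + n % 2^k) ^^^ (2^k * 0 + m) := by rw [← hd]; norm_num
    _ = _ := by rw [this]; simp

-- B's loop returns m as soon as the shifted value and the carry are both zero
theorem loopB_stop (N : Int) : ∀ (f k : Nat) (m : Int), N >>> k = 0 →
    ABPairsLoopB N f k m 0 = m := by
  intro f k m h
  cases f with
  | zero => rfl
  | succ f => simp [ABPairsLoopB, h]

-- band with the mask 2^K - 1 is reduction mod 2^K, on casts of naturals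
theorem band_mask_natCast (x : Nat) (K : Nat) :
    PySem.Int.band (x : Int) (2 * 2^K - 1) = ((x % 2^(K+1) : Nat) : Int) := by
  have h1 : (2 * 2^K - 1 : Int) = ((2^(K+1) - 1 : Nat) : Int) := by
    have : (1:Nat) ≤ 2^(K+1) := Nat.one_le_two_pow
    push_cast [this]
    rw [pow_succ]; ring
  rw [h1, PySem.Int.band_natCast, Nat.and_two_pow_sub_one_eq_mod]

-- the master invariant: from matching states, A's loop and B's loop return the same value
theorem master (n : Nat) : ∀ (f : Nat) (k m c : Nat), c ≤ 1 → m < 2^k →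
    ((n:Int) + (m:Int) = 2 * ((n ^^^ m : Nat) : Int) + ((c:Int) - ((n >>> k : Nat) : Int)) * 2^k) →
    n >>> k < 2^f →
    ABPairsLoopA (n:Int) f ((2:Int)^k) (m:Int) = ABPairsLoopB (n:Int) f k (m:Int) (c:Int) := by
  intro f
  induction f with
  | zero => intro k m c _ _ _ _; rfl
  | succ f ih =>
    intro k m c hc hm hinv hf
    have hkpos : (0:Nat) < 2^k := Nat.two_pow_pos k
    have hkposI : (0:Int) < 2^k := by positivity
    set s : Nat := n >>> k with hs
    set nk : Nat := s % 2 with hnk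
    have hs' : n >>> (k+1) = s / 2 := by
      rw [hs, Nat.shiftRight_eq_div_pow, Nat.shiftRight_eq_div_pow, pow_succ, Nat.div_div_eq_div_mul]
    obtain ⟨t, ht⟩ : ∃ t, s / 2 = t := ⟨_, rfl⟩
    rw [ht] at hs'
    have hshift : ((n:Int) >>> k) = ((s:Nat) : Int) := by rw [Int.natCast_shiftRight]
    -- A's loop condition: the equation holds iff c = s
    have hcond : ((n:Int) + (m:Int) = 2 * PySem.Int.bxor (n:Int) (m:Int)) ↔ (c = s) := by
      rw [PySem.Int.bxor_natCast, hinv]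
      constructor
      · intro h
        have : ((c:Int) - s) * 2^k = 0 := by linarith
        have := mul_eq_zero.mp this
        omega
      · intro h; rw [h]; ring
    by_cases hcs : c = s
    · -- A stops; c ≤ 1 so s ≤ 1
      have hA : ABPairsLoopA (n:Int) (f+1) ((2:Int)^k) (m:Int) = (m:Int) := by
        simp only [ABPairsLoopA, if_pos (hcond.mpr hcs)]
      rcases (by omega : s = 0 ∨ s = 1) with h0 | h1
      · -- s = 0, c = 0 : B stops too
        have : (c:Int) = 0 := by omega
        rw [hA, this, loopB_stop _ _ _ _ (by rw [hshift, h0]; rfl)]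
      · -- s = 1, c = 1 : B does one idle step then stops
        have hc1 : (c:Int) = 1 := by omega
        have hB : ABPairsLoopB (n:Int) (f+1) k (m:Int) (c:Int)
            = ABPairsLoopB (n:Int) f (k+1) ((m:Int) + (PySem.Int.bxor (PySem.Int.band ((n:Int) >>> k) 1) (c:Int)) <<< k)
                (PySem.Int.band (PySem.Int.band ((n:Int) >>> k) 1) (PySem.Int.bxor (PySem.Int.band ((n:Int) >>> k) 1) (c:Int))) := by
          simp only [ABPairsLoopB]
          rw [if_pos]
          left; rw [hshift, h1]; norm_num
        have hni : PySem.Int.band ((n:Int) >>> k) 1 = 1 := by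
          rw [hshift, h1]; decide
        rw [hA, hB, hni, hc1]
        have hmi : PySem.Int.bxor 1 1 = 0 := by decide
        have hcar : PySem.Int.band 1 (PySem.Int.bxor 1 1) = 0 := by decide
        rw [hcar, hmi]
        have : ((0:Int)) <<< k = 0 := by simp [Int.shiftLeft_eq]
        rw [this, add_zero, loopB_stop _ _ _ _ (by rw [← Int.natCast_shiftRight, hs']; omega)]
    · -- both loops take a real step
      have hsplit : (n ^^^ m : Nat) = 2^k * s + ((n % 2^k) ^^^ m) := xor_split_at n m k hm
      have hBcond : ((n:Int) >>> k ≠ 0 ∨ (c:Int) ≠ 0) := by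
        rw [hshift]
        by_cases h0 : s = 0
        · right; omega
        · left; exact_mod_cast h0
      have hni : PySem.Int.band ((n:Int) >>> k) 1 = ((nk:Nat) : Int) := by
        rw [hshift, show ((s:Nat):Int) = ((s:Nat):Int) from rfl]
        rw [show ((1:Int)) = ((1:Nat):Int) from rfl, PySem.Int.band_natCast, Nat.and_one_is_mod]
      -- the two sides of A's masked comparison
      have hmaskL : PySem.Int.band ((n:Int) + (m:Int)) (2 * 2^k - 1)
          = (((n + m) % 2^(k+1) : Nat) : Int) := by
        rw [show ((n:Int) + (m:Int)) = (((n + m : Nat)) : Int) by push_cast; ring, band_mask_natCast]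
      have hmaskR : PySem.Int.band (2 * PySem.Int.bxor (n:Int) (m:Int)) (2 * 2^k - 1)
          = (((2 * (n ^^^ m)) % 2^(k+1) : Nat) : Int) := by
        rw [PySem.Int.bxor_natCast,
          show (2 * ((n ^^^ m : Nat) : Int)) = (((2 * (n ^^^ m) : Nat)) : Int) by push_cast; ring,
          band_mask_natCast]
      -- masked comparison decides exactly whether c = nk
      have hmaskIff : (PySem.Int.band ((n:Int) + (m:Int)) (2 * 2^k - 1)
          = PySem.Int.band (2 * PySem.Int.bxor (n:Int) (m:Int)) (2 * 2^k - 1)) ↔ (c = nk) := by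
        rw [hmaskL, hmaskR]
        have cast_iff : ((((n + m) % 2^(k+1) : Nat) : Int) = (((2 * (n ^^^ m)) % 2^(k+1) : Nat) : Int))
            ↔ ((n + m : Int) % 2^(k+1) = (2 * ((n ^^^ m : Nat) : Int)) % 2^(k+1)) := by
          constructor <;> intro h <;> exact_mod_cast h
        rw [cast_iff]
        have dvd_iff : ((n + m : Int) % 2^(k+1) = (2 * ((n ^^^ m : Nat) : Int)) % 2^(k+1))
            ↔ ((2:Int)^(k+1) ∣ (2 * ((n ^^^ m : Nat) : Int)) - ((n:Int) + (m:Int))) := by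
          exact Int.modEq_iff_dvd
        rw [dvd_iff, show (2 * ((n ^^^ m : Nat) : Int)) - ((n:Int) + (m:Int)) = (((s:Int) - c)) * 2^k by
          rw [hinv]; ring]
        rw [show ((2:Int)^(k+1)) = 2 * 2^k by ring]
        rw [show ((2:Int) * 2^k) = 2 * 2^k by ring]
        have : ((2:Int) * 2^k ∣ ((s:Int) - c) * 2^k) ↔ ((2:Int) ∣ ((s:Int) - c)) :=
          mul_dvd_mul_iff_right (by positivity : ((2:Int)^k) ≠ 0)
        rw [this]
        omega
      -- B's step values as naturals
      set mi : Nat := nk ^^^ c with hmi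
      have hmiI : PySem.Int.bxor ((nk:Nat) : Int) ((c:Nat) : Int) = ((mi:Nat) : Int) :=
        PySem.Int.bxor_natCast nk c
      have hcarI : PySem.Int.band ((nk:Nat) : Int) ((mi:Nat) : Int) = (((nk &&& mi : Nat)) : Int) :=
        PySem.Int.band_natCast nk mi
      have hshl : (((mi:Nat) : Int)) <<< k = ((mi * 2^k : Nat) : Int) := by
        rw [Int.shiftLeft_eq]; push_cast; ring
      -- one unfolded step of each loop
      have hA : ABPairsLoopA (n:Int) (f+1) ((2:Int)^k) (m:Int)
          = ABPairsLoopA (n:Int) f ((2:Int)^k * 2)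
              (if c = nk then (m:Int) else (m:Int) + (2:Int)^k) := by
        simp only [ABPairsLoopA]
        rw [if_neg (by rw [hcond]; exact hcs)]
        by_cases hcnk : c = nk
        · rw [if_pos hcnk]
          congr 1
          rw [if_neg (by simpa using hmaskIff.mpr hcnk)]
        · rw [if_neg hcnk]
          congr 1
          rw [if_pos (by simpa using fun h => hcnk (hmaskIff.mp h))]
      have hB : ABPairsLoopB (n:Int) (f+1) k (m:Int) (c:Int)
          = ABPairsLoopB (n:Int) f (k+1) ((m:Int) + ((mi * 2^k : Nat) : Int)) (((nk &&& mi : Nat)) : Int) := by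
        simp only [ABPairsLoopB]
        rw [if_pos hBcond, hni, hmiI, hshl, hcarI]
      rw [hA, hB]
      -- set up the recursive application
      have hsdec : s = 2 * (t) + nk := by omega
      have hb2 : ((2:Int)^k * 2) = (2:Int)^(k+1) := by ring
      have hfuel : n >>> (k+1) < 2^f := by
        rw [hs']
        have : (2:Nat)^(f+1) = 2^f * 2 := Nat.pow_succ ..
        omega
      have hxm' : (n ^^^ (m + mi * 2^k) : Nat) = 2^k * (2*(t) + (nk ^^^ mi)) + ((n % 2^k) ^^^ m) := by
        have hd : n = 2^k * s + n % 2^k := by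
          rw [hs, Nat.shiftRight_eq_div_pow]; exact (Nat.div_add_mod n (2^k)).symm
        have hmask : n % 2^k < 2^k := Nat.mod_lt _ hkpos
        have hmi2 : mi < 2 := by rw [hmi]; rcases (by omega : nk = 0 ∨ nk = 1) with h|h <;> rcases (by omega : c = 0 ∨ c = 1) with g|g <;> simp [h,g]
        have comm : m + mi * 2^k = 2^k * mi + m := by ring
        calc n ^^^ (m + mi * 2^k)
            = (2^k * s + n % 2^k) ^^^ (2^k * mi + m) := by rw [← hd, comm]
          _ = 2^k * (s ^^^ mi) + ((n % 2^k) ^^^ m) := split_xor k s mi _ _ hmask hm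
          _ = _ := by
              congr 2
              calc s ^^^ mi = (2*(t) + nk) ^^^ (2*0 + mi) := by rw [← hsdec]; norm_num
                _ = 2*((t) ^^^ 0) + (nk ^^^ mi) := xor_bit_arith _ _ _ _ (by omega) hmi2
                _ = 2*(t) + (nk ^^^ mi) := by simp
      -- recurse, splitting on the two bit values
      have hpow : (2:Nat)^(k+1) = 2^k*2 := Nat.pow_succ ..
      push_cast [hsplit] at hinv
      rcases (by omega : nk = 0 ∨ nk = 1) with h0 | h1 <;>
        rcases (by omega : c = 0 ∨ c = 1) with g0 | g1
      · -- nk = 0, c = 0 : no bit set, carry stays 0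
        have hmiv : mi = 0 := by simp [hmi, h0, g0]
        have hxv : nk ^^^ mi = 0 := by simp [h0, hmiv]
        have hcv : nk &&& mi = 0 := by simp [h0, hmiv]
        have hsI : ((s:Nat):Int) = 2*(((t : Nat)):Int) := by omega
        rw [g0, hsI] at hinv
        have hIH := ih (k+1) (m + mi * 2^k) 0 (by omega)
          (by rw [hmiv]; simpa using by omega)
          (by rw [hxm', hs', hxv, hmiv]
              push_cast
              linear_combination hinv) hfuel
        have eA : ((m + mi * 2^k : Nat) : Int) = (↑m : Int) := by rw [hmiv]; push_cast; ring
        have eB : ((m:Nat):Int) + ((mi * 2^k : Nat) : Int) = ((m + mi * 2^k : Nat) : Int) := by push_cast; ring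
        rw [hb2, if_pos (by omega : c = nk), eB, hcv, ← eA]
        exact hIH
      · -- nk = 0, c = 1 : bit set, carry becomes 0
        have hmiv : mi = 1 := by simp [hmi, h0, g1]
        have hxv : nk ^^^ mi = 1 := by simp [h0, hmiv]
        have hcv : nk &&& mi = 0 := by simp [h0, hmiv]
        have hsI : ((s:Nat):Int) = 2*(((t : Nat)):Int) := by omega
        rw [g1, hsI] at hinv
        have hIH := ih (k+1) (m + mi * 2^k) 0 (by omega)
          (by rw [hmiv]; simpa using by omega)
          (by rw [hxm', hs', hxv, hmiv]
              push_cast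
              linear_combination hinv) hfuel
        have eA : ((m + mi * 2^k : Nat) : Int) = ↑m + 2^k := by rw [hmiv]; push_cast; ring
        have eB : ((m:Nat):Int) + ((mi * 2^k : Nat) : Int) = ((m + mi * 2^k : Nat) : Int) := by push_cast; ring
        rw [hb2, if_neg (by omega : ¬ c = nk), eB, hcv, ← eA]
        exact hIH
      · -- nk = 1, c = 0 : bit set, carry becomes 1
        have hmiv : mi = 1 := by simp [hmi, h1, g0]
        have hxv : nk ^^^ mi = 0 := by simp [h1, hmiv]
        have hcv : nk &&& mi = 1 := by simp [h1, hmiv]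
        have hsI : ((s:Nat):Int) = 2*(((t : Nat)):Int) + 1 := by omega
        rw [g0, hsI] at hinv
        have hIH := ih (k+1) (m + mi * 2^k) 1 (by omega)
          (by rw [hmiv]; simpa using by omega)
          (by rw [hxm', hs', hxv, hmiv]
              push_cast
              linear_combination hinv) hfuel
        have eA : ((m + mi * 2^k : Nat) : Int) = ↑m + 2^k := by rw [hmiv]; push_cast; ring
        have eB : ((m:Nat):Int) + ((mi * 2^k : Nat) : Int) = ((m + mi * 2^k : Nat) : Int) := by push_cast; ring
        rw [hb2, if_neg (by omega : ¬ c = nk), eB, hcv, ← eA]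
        exact hIH
      · -- nk = 1, c = 1 : no bit set, carry becomes 0
        have hmiv : mi = 0 := by simp [hmi, h1, g1]
        have hxv : nk ^^^ mi = 1 := by simp [h1, hmiv]
        have hcv : nk &&& mi = 0 := by simp [h1, hmiv]
        have hsI : ((s:Nat):Int) = 2*(((t : Nat)):Int) + 1 := by omega
        rw [g1, hsI] at hinv
        have hIH := ih (k+1) (m + mi * 2^k) 0 (by omega)
          (by rw [hmiv]; simpa using by omega)
          (by rw [hxm', hs', hxv, hmiv]
              push_cast
              linear_combination hinv) hfuel
        have eA : ((m + mi * 2^k : Nat) : Int) = (↑m : Int) := by rw [hmiv]; push_cast; ring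
        have eB : ((m:Nat):Int) + ((mi * 2^k : Nat) : Int) = ((m + mi * 2^k : Nat) : Int) := by push_cast; ring
        rw [hb2, if_pos (by omega : c = nk), eB, hcv, ← eA]
        exact hIH

-- ===== VERDICT (by name: the statement is the Claim_ definition above) =====
theorem ABPairs_spec : Claim_equal_ABPairs := by
  intro N hdom hpre
  unfold Spec_ABPairs ABPairs ABPairs_alt
  have hN : N = ((N.toNat : Nat) : Int) := (Int.toNat_of_nonneg hpre).symm
  set n : Nat := N.toNat with hn
  have hbound : n < 2^100 := by
    have h1 : N ≤ 2147483648 := by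
      have := hdom
      unfold Dom_ABPairs pvDomInt at this
      simp at this
      exact this.2
    have : n ≤ 2147483648 := by omega
    calc n ≤ 2147483648 := this
      _ < 2^100 := by norm_num
  have h0 := master n 100 0 0 0 (by omega) (by norm_num)
    (by simp; ring) (by simpa using hbound)
  rw [hN]
  simpa using h0
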